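-- pv_equiv track=rewrite | github.com/cleve/afn | app/afn.py | _progress_chunks
-- ===== SOURCE A (Python) =====
-- def _progress_chunks(total_iterations: int, workers: int):
--     """Create smaller chunks so progress can update frequently in process mode."""
--     if total_iterations <= 0:
--         return []
--
--     # Aim for multiple updates per worker while keeping process overhead reasonable.
--     target_chunks = max(workers * 8, workers)
--     chunk_size = max(1, total_iterations // target_chunks)
--
--     chunks = []
--     remaining = total_iterations
--     while remaining > 0:
--         current = min(chunk_size, remaining)
--         chunks.append(current)
--         remaining -= current
--     return chunks
-- ===== SOURCE B (Python) =====
-- def _progress_chunks(total_iterations: int, workers: int):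
--     """Create smaller chunks so progress can update frequently in process mode."""
--     if total_iterations <= 0:
--         return []
--     target_chunks = max(workers * 8, workers)
--     chunk_size = max(1, total_iterations // target_chunks)
--     n, rem = divmod(total_iterations, chunk_size)
--     return [chunk_size] * n + ([rem] if rem else [])
-- ===== Notes on version B (the rewrite author's own statement) =====
-- stated objective: simpler
-- what changed: Replaced the while-loop accumulation with a closed form: divmod gives the number of full chunks and the remainder, and the list is built as [chunk_size]*n plus an optional remainder chunk (no per-chunk loop arithmetic).
import Mathlib
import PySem

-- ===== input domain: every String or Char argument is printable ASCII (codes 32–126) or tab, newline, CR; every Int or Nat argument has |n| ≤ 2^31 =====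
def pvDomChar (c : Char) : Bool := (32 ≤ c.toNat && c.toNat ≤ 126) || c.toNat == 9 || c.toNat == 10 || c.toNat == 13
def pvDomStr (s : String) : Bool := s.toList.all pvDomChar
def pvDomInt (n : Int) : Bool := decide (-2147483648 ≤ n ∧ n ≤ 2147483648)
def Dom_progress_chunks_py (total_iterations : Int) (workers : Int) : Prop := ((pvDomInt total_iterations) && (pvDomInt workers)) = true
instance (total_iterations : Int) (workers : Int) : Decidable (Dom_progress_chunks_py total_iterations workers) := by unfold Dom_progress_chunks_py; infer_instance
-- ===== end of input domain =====

-- B replaces A's while-loop accumulation with a divmod closed form: n full chunks plus an optional remainder chunk (objective: simpler).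


-- ===== PORT A =====
-- the while-loop: fuel = remaining.toNat suffices because each step removes min chunk_size remaining ≥ 1 when chunk_size ≥ 1
def pcLoopA (fuel : Nat) (chunk_size : Int) (remaining : Int) : List Int :=
  match fuel with
  | 0 => []
  | fuel + 1 =>
    if remaining > 0 then
      let current := min chunk_size remaining
      current :: pcLoopA fuel chunk_size (remaining - current)
    else []

def progress_chunks_py (total_iterations : Int) (workers : Int) : List Int :=
  if total_iterations ≤ 0 then []
  else
    let target_chunks := max (workers * 8) workers
    let chunk_size := max 1 (PySem.Int.floordiv total_iterations target_chunks)
    pcLoopA total_iterations.toNat chunk_size total_iterations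

-- ===== PORT B =====
def progress_chunks_py_alt (total_iterations : Int) (workers : Int) : List Int :=
  if total_iterations ≤ 0 then []
  else
    let target_chunks := max (workers * 8) workers
    let chunk_size := max 1 (PySem.Int.floordiv total_iterations target_chunks)
    let n := PySem.Int.floordiv total_iterations chunk_size
    let rem := PySem.Int.mod total_iterations chunk_size
    List.replicate n.toNat chunk_size ++ (if rem ≠ 0 then [rem] else [])

-- ===== PRECONDITION & SPEC =====
-- Pre_ excludes only the inputs where A raises ZeroDivisionError (workers = 0 with total_iterations > 0); B raises there too.
def Pre_progress_chunks_py (total_iterations : Int) (workers : Int) : Prop :=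
  total_iterations ≤ 0 ∨ workers ≠ 0
instance (total_iterations : Int) (workers : Int) : Decidable (Pre_progress_chunks_py total_iterations workers) := by unfold Pre_progress_chunks_py; infer_instance
def pvWitness_progress_chunks_py : Int × Int := (100, 3)

def Spec_progress_chunks_py (total_iterations : Int) (workers : Int) (out : List Int) : Prop := out = progress_chunks_py_alt total_iterations workers
instance (total_iterations : Int) (workers : Int) (out : List Int) : Decidable (Spec_progress_chunks_py total_iterations workers out) := by unfold Spec_progress_chunks_py; infer_instance

-- ===== CLAIM (what is proved, stated in full; the proofs are below) =====
def Claim_equal_progress_chunks_py : Prop := ∀ (total_iterations : Int) (workers : Int), Dom_progress_chunks_py total_iterations workers → Pre_progress_chunks_py total_iterations workers → Spec_progress_chunks_py total_iterations workers (progress_chunks_py total_iterations workers)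

-- ===== LEMMAS AND PROOFS =====
-- the loop with chunk size cs ≥ 1 on remaining r ≥ 0 (with enough fuel) yields the divmod closed form
theorem pcLoopA_closed (fuel : Nat) : ∀ (cs r : Int), 1 ≤ cs → 0 ≤ r → r.toNat ≤ fuel →
    pcLoopA fuel cs r =
      List.replicate (PySem.Int.floordiv r cs).toNat cs ++
        (if PySem.Int.mod r cs ≠ 0 then [PySem.Int.mod r cs] else []) := by
  induction fuel with
  | zero =>
    intro cs r hcs hr hf
    have hr0 : r = 0 := by omega
    subst hr0
    simp [pcLoopA, PySem.Int.floordiv_eq_ediv_of_pos (by omega : (0:Int) < cs),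
      PySem.Int.mod_eq_emod_of_pos (by omega : (0:Int) < cs)]
  | succ fuel ih =>
    intro cs r hcs hr hf
    have hcs0 : (0:Int) < cs := by omega
    rw [PySem.Int.floordiv_eq_ediv_of_pos hcs0, PySem.Int.mod_eq_emod_of_pos hcs0]
    by_cases hpos : r > 0
    · rw [pcLoopA]
      simp only [hpos, if_pos]
      by_cases hge : cs ≤ r
      · -- full chunk
        have hmin : min cs r = cs := by omega
        rw [hmin]
        rw [ih cs (r - cs) hcs (by omega) (by omega)]
        rw [PySem.Int.floordiv_eq_ediv_of_pos hcs0, PySem.Int.mod_eq_emod_of_pos hcs0]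
        have hdiv : r / cs = (r - cs) / cs + 1 := by
          conv_lhs => rw [show r = (r - cs) + 1 * cs by ring]
          rw [Int.add_mul_ediv_right _ _ (by omega : cs ≠ 0)]
        have hmod : r % cs = (r - cs) % cs := by
          conv_lhs => rw [show r = (r - cs) + 1 * cs by ring]
          rw [Int.add_mul_emod_self_right]
        have hdivpos : 1 ≤ r / cs := by
          rw [Int.le_ediv_iff_mul_le hcs0]; omega
        rw [hdiv, hmod]
        have : ((r - cs) / cs + 1).toNat = ((r - cs) / cs).toNat + 1 := by
          have : 0 ≤ (r - cs) / cs := Int.ediv_nonneg (by omega) (by omega)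
          omega
        rw [this, List.replicate_succ, List.cons_append]
      · -- last partial chunk: 0 < r < cs
        have hmin : min cs r = r := by omega
        rw [hmin]
        have hdiv : r / cs = 0 := Int.ediv_eq_zero_of_lt (by omega) (by omega)
        have hmod : r % cs = r := Int.emod_eq_of_lt (by omega) (by omega)
        have hz : pcLoopA fuel cs 0 = [] := by cases fuel <;> simp [pcLoopA]
        simp [hdiv, hmod, hz, show ¬ r = 0 by omega]
    · have hr0 : r = 0 := by omega
      subst hr0
      simp [pcLoopA]

-- ===== VERDICT (by name: the statement is the Claim_ definition above) =====
theorem progress_chunks_py_spec : Claim_equal_progress_chunks_py := by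
  intro t w _ _
  unfold Spec_progress_chunks_py progress_chunks_py progress_chunks_py_alt
  by_cases ht : t ≤ 0
  · simp [ht]
  · simp only [ht]
    have hcs : (1:Int) ≤ max 1 (PySem.Int.floordiv t (max (w * 8) w)) := le_max_left _ _
    exact pcLoopA_closed t.toNat _ t hcs (by omega) (le_refl _)
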